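-- pv_equiv track=rewrite | github.com/ninjra/statistics_harness | plugins/analysis_upload_linkage/plugin.py | _pick_process_column
-- ===== SOURCE A (Python) =====
-- def _pick_process_column(candidates: list[str]) -> str | None:
--     for col in candidates:
--         name = str(col).lower()
--         if name in {"process_id", "process"} or name.endswith("process_id"):
--             return col
--     for col in candidates:
--         name = str(col).lower()
--         if "process" in name and "queue" not in name and "parent" not in name:
--             return col
--     return candidates[0] if candidates else None
-- ===== SOURCE B (Python) =====
-- def _pick_process_column(candidates: list[str]) -> str | None:
--     def rank(col):
--         name = str(col).lower()
--         if name in {"process_id", "process"} or name.endswith("process_id"):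
--             return 0
--         if "process" in name and "queue" not in name and "parent" not in name:
--             return 1
--         return 2
--     return min(candidates, key=rank) if candidates else None
-- ===== Notes on version B (the rewrite author's own statement) =====
-- stated objective: alternative
-- what changed: Replaced A's two staged scans (exact-name pass, then fuzzy-substring pass, then head fallback) by scoring each candidate with a rank (0 exact, 1 fuzzy, 2 other) and taking min(candidates, key=rank), relying on min keeping the first minimal element.
import Mathlib
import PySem

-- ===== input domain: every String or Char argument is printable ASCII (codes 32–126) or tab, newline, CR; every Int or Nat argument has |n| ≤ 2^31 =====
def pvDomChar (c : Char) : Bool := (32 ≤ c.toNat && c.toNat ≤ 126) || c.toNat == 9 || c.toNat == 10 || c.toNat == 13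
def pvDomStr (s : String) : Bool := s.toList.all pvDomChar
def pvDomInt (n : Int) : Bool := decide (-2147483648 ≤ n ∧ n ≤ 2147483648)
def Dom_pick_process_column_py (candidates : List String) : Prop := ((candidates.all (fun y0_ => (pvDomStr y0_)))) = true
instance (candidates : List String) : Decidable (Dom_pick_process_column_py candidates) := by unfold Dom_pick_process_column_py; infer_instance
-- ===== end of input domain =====

-- B replaces A's two staged scans by scoring each candidate (0 exact, 1 fuzzy, 2 other)
-- and taking min(candidates, key=rank) — min keeps the first minimal element (alternative algorithm).

-- ===== PORT A =====
-- the exact-name test of A's first loop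
def pvExact (col : String) : Bool :=
  let name := PySem.Str.lower col
  name == "process_id" || name == "process" || PySem.Str.endswith name "process_id"

-- the fuzzy-substring test of A's second loop
def pvFuzzy (col : String) : Bool :=
  let name := PySem.Str.lower col
  PySem.Str.isIn "process" name && !PySem.Str.isIn "queue" name && !PySem.Str.isIn "parent" name

def pickPass1 : List String → Option String
  | [] => none
  | col :: rest => if pvExact col then some col else pickPass1 rest

def pickPass2 : List String → Option String
  | [] => none
  | col :: rest => if pvFuzzy col then some col else pickPass2 rest

def pick_process_column_py (candidates : List String) : Option String :=
  match pickPass1 candidates with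
  | some col => some col
  | none =>
    match pickPass2 candidates with
    | some col => some col
    | none => candidates.head?

-- ===== PORT B =====
def pvRank (col : String) : Nat :=
  if pvExact col then 0 else if pvFuzzy col then 1 else 2

def pick_process_column_py_alt (candidates : List String) : Option String :=
  if candidates.isEmpty then none else PySem.List.min? candidates pvRank

-- ===== PRECONDITION & SPEC =====
def Spec_pick_process_column_py (candidates : List String) (out : Option String) : Prop := out = pick_process_column_py_alt candidates
instance (candidates : List String) (out : Option String) : Decidable (Spec_pick_process_column_py candidates out) := by unfold Spec_pick_process_column_py; infer_instance

-- ===== CLAIM (what is proved, stated in full; the proofs are below) =====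
def Claim_equal_pick_process_column_py : Prop := ∀ (candidates : List String), Dom_pick_process_column_py candidates → Spec_pick_process_column_py candidates (pick_process_column_py candidates)

-- ===== LEMMAS AND PROOFS =====

-- the fold that PySem.List.min? performs (min with key keeps the FIRST minimal element)
def pvStep (acc : Option String) (x : String) : Option String :=
  match acc with
  | none => some x
  | some m => if pvRank x < pvRank m then some x else some m

theorem min?_eq_foldl (cs : List String) :
    PySem.List.min? cs pvRank = cs.foldl pvStep none := by
  unfold PySem.List.min?
  apply List.foldl_ext
  intro acc x _
  cases acc <;> rfl

-- the accumulator is never replaced when no later rank is strictly smaller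
theorem foldl_const (cs : List String) (m : String)
    (h : ∀ x ∈ cs, ¬ pvRank x < pvRank m) : cs.foldl pvStep (some m) = some m := by
  induction cs with
  | nil => rfl
  | cons a t ih =>
    have ha := h a (by simp)
    simp only [List.foldl_cons, pvStep, if_neg ha]
    exact ih (fun x hx => h x (List.mem_cons_of_mem a hx))

theorem rank_exact {c : String} (h : pvExact c = true) : pvRank c = 0 := by
  simp [pvRank, h]

theorem rank_ge_one {c : String} (h : pvExact c = false) : 1 ≤ pvRank c := by
  unfold pvRank
  rw [h]
  by_cases hf : pvFuzzy c = true <;> simp [hf]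

theorem rank_fuzzy {c : String} (h1 : pvExact c = false) (h2 : pvFuzzy c = true) :
    pvRank c = 1 := by simp [pvRank, h1, h2]

theorem rank_two {c : String} (h1 : pvExact c = false) (h2 : pvFuzzy c = false) :
    pvRank c = 2 := by simp [pvRank, h1, h2]

-- pass 1 found the first exact match: the min fold returns it, from any none-or-rank-≥1 accumulator
theorem fold_of_pass1 (cs : List String) (c : String) (acc : Option String)
    (hp : pickPass1 cs = some c)
    (hacc : acc = none ∨ ∃ m, acc = some m ∧ 1 ≤ pvRank m) :
    cs.foldl pvStep acc = some c := by
  induction cs generalizing acc with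
  | nil => simp [pickPass1] at hp
  | cons a t ih =>
    by_cases he : pvExact a = true
    · have hca : a = c := by simpa [pickPass1, he] using hp
      rw [← hca]
      have hstep : pvStep acc a = some a := by
        rcases hacc with h | ⟨m, hm, hge⟩
        · simp [h, pvStep]
        · have hlt : pvRank a < pvRank m := by rw [rank_exact he]; omega
          simp [hm, pvStep, hlt]
      rw [List.foldl_cons, hstep]
      exact foldl_const t a (fun x hx => by rw [rank_exact he]; omega)
    · have he' : pvExact a = false := by simpa using he
      have hp' : pickPass1 t = some c := by simpa [pickPass1, he'] using hp
      have hacc' : pvStep acc a = none ∨ ∃ m, pvStep acc a = some m ∧ 1 ≤ pvRank m := by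
        rcases hacc with h | ⟨m, hm, hge⟩
        · exact Or.inr ⟨a, by simp [h, pvStep], rank_ge_one he'⟩
        · simp only [hm, pvStep]
          split
          · exact Or.inr ⟨a, rfl, rank_ge_one he'⟩
          · exact Or.inr ⟨m, rfl, hge⟩
      rw [List.foldl_cons]
      exact ih (pvStep acc a) hp' hacc'

-- pass 1 empty means every element is non-exact
theorem pass1_none (cs : List String) (h : pickPass1 cs = none) :
    ∀ x ∈ cs, pvExact x = false := by
  induction cs with
  | nil => intro x hx; simp at hx
  | cons a t ih =>
    by_cases he : pvExact a = true
    · simp [pickPass1, he] at h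
    · intro x hx
      rcases List.mem_cons.1 hx with rfl | hx'
      · simpa using he
      · exact ih (by simpa [pickPass1, he] using h) x hx'

theorem pass2_none (cs : List String) (h : pickPass2 cs = none) :
    ∀ x ∈ cs, pvFuzzy x = false := by
  induction cs with
  | nil => intro x hx; simp at hx
  | cons a t ih =>
    by_cases he : pvFuzzy a = true
    · simp [pickPass2, he] at h
    · intro x hx
      rcases List.mem_cons.1 hx with rfl | hx'
      · simpa using he
      · exact ih (by simpa [pickPass2, he] using h) x hx'

-- pass 2 found the first fuzzy match in an exact-free list: the fold returns it
theorem fold_of_pass2 (cs : List String) (c : String) (acc : Option String)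
    (hall : ∀ x ∈ cs, pvExact x = false)
    (hp : pickPass2 cs = some c)
    (hacc : acc = none ∨ ∃ m, acc = some m ∧ pvRank m = 2) :
    cs.foldl pvStep acc = some c := by
  induction cs generalizing acc with
  | nil => simp [pickPass2] at hp
  | cons a t ih =>
    have hea : pvExact a = false := hall a (by simp)
    by_cases hf : pvFuzzy a = true
    · have hca : a = c := by simpa [pickPass2, hf] using hp
      rw [← hca]
      have hra : pvRank a = 1 := rank_fuzzy hea hf
      have hstep : pvStep acc a = some a := by
        rcases hacc with h | ⟨m, hm, hr2⟩
        · simp [h, pvStep]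
        · have hlt : pvRank a < pvRank m := by rw [hra, hr2]; omega
          simp [hm, pvStep, hlt]
      rw [List.foldl_cons, hstep]
      refine foldl_const t a (fun x hx => ?_)
      rw [hra]
      have := rank_ge_one (hall x (List.mem_cons_of_mem a hx))
      omega
    · have hf' : pvFuzzy a = false := by simpa using hf
      have hra : pvRank a = 2 := rank_two hea hf'
      have hp' : pickPass2 t = some c := by simpa [pickPass2, hf'] using hp
      have hacc' : pvStep acc a = none ∨ ∃ m, pvStep acc a = some m ∧ pvRank m = 2 := by
        rcases hacc with h | ⟨m, hm, hr2⟩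
        · exact Or.inr ⟨a, by simp [h, pvStep], hra⟩
        · refine Or.inr ?_
          simp only [hm, pvStep]
          split
          · exact ⟨a, rfl, hra⟩
          · exact ⟨m, rfl, hr2⟩
      rw [List.foldl_cons]
      exact ih (pvStep acc a) (fun x hx => hall x (List.mem_cons_of_mem a hx)) hp' hacc'

-- both passes empty: every rank is 2 and the fold returns the head
theorem fold_of_none (cs : List String)
    (hall : ∀ x ∈ cs, pvRank x = 2) :
    cs.foldl pvStep none = cs.head? := by
  cases cs with
  | nil => rfl
  | cons a t =>
    have hstep : pvStep none a = some a := rfl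
    rw [List.foldl_cons, hstep, List.head?_cons]
    refine foldl_const t a (fun x hx => ?_)
    rw [hall x (List.mem_cons_of_mem a hx), hall a (by simp)]
    omega

-- ===== VERDICT (by name: the statement is the Claim_ definition above) =====
theorem pick_process_column_py_spec : Claim_equal_pick_process_column_py := by
  intro candidates _
  unfold Spec_pick_process_column_py pick_process_column_py pick_process_column_py_alt
  cases candidates with
  | nil => rfl
  | cons a t =>
    rw [if_neg (by simp), min?_eq_foldl]
    cases h1 : pickPass1 (a :: t) with
    | some c => exact (fold_of_pass1 (a :: t) c none h1 (Or.inl rfl)).symm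
    | none =>
      have hall := pass1_none _ h1
      cases h2 : pickPass2 (a :: t) with
      | some c => exact (fold_of_pass2 (a :: t) c none hall h2 (Or.inl rfl)).symm
      | none =>
        have hall2 := pass2_none _ h2
        exact (fold_of_none (a :: t)
          (fun x hx => rank_two (hall x hx) (hall2 x hx))).symm
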